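-- pv_equiv track=rewrite | github.com/flukeiedong/project-euler | beforeSIIT/15.py | c_RD
-- ===== SOURCE A (Python) =====
-- def c_RD(line):
--     countR = 0
--     countD = 0
--     for alp in line:
--         if alp == "R":
--             countR += 1
--         elif alp == "D":
--             countD += 1
--
--         if countD > length or countR > length:
--             return False
--     return True
--
-- length = 7
-- ===== SOURCE B (Python) =====
-- length = 7
--
-- def c_RD(line):
--     # Instead of counting: search for the (length+1)-th occurrence of the
--     # character by repeated find-and-cut (at most length+1 rounds); the line
--     # is acceptable iff that occurrence does not exist.
--     def fits(ch, s):
--         for _ in range(length + 1):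
--             i = s.find(ch)
--             if i == -1:
--                 return True
--             s = s[i + 1:]
--         return False
--     return fits("R", line) and fits("D", line)
-- ===== Notes on version B (the rewrite author's own statement) =====
-- stated objective: faster
-- what changed: Replaced the per-character counter loop with early exit by an occurrence search: for each target character it runs at most length+1 rounds of find-and-cut (find the next occurrence, slice past it), returning True iff the (length+1)-th occurrence does not exist; no counters are kept, and each round is a C-level str.find scan instead of Python-level iteration.
import Mathlib
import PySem

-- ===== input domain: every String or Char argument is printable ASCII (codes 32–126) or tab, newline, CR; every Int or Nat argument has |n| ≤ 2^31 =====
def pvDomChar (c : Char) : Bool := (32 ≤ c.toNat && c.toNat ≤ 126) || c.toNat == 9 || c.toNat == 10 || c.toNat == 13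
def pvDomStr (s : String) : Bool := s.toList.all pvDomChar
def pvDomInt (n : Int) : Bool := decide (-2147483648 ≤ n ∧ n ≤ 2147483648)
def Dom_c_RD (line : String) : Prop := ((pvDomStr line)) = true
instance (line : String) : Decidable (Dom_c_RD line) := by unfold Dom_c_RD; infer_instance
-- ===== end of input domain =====

-- B replaces A's counter scan (early exit) by an occurrence search: at most length+1 rounds of find-and-cut per target character; measurably faster in Python (C-level find vs per-character loop).


-- ===== PORT A =====
-- the module constant 'length = 7'
def pvLength : Int := 7

-- the for-loop with its two counters and early return
def c_RD_go : List Char → Int → Int → Bool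
  | [], _, _ => true
  | alp :: rest, countR, countD =>
    let st :=
      if alp = 'R' then (countR + 1, countD)
      else if alp = 'D' then (countR, countD + 1)
      else (countR, countD)
    if pvLength < st.2 ∨ pvLength < st.1 then false
    else c_RD_go rest st.1 st.2

def c_RD (line : String) : Bool := c_RD_go line.toList 0 0

-- ===== PORT B =====
-- 'for _ in range(length + 1): i = s.find(ch); if i == -1: return True; s = s[i+1:]' / 'return False'
def fitsGo (ch : Char) : Nat → List Char → Bool
  | 0, _ => false
  | k + 1, s =>
    let i := PySem.Chars.find s [ch]
    if i = -1 then true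
    else fitsGo ch k (PySem.List.slice s (some (i + 1)) none)

def c_RD_alt (line : String) : Bool :=
  fitsGo 'R' (pvLength + 1).toNat line.toList && fitsGo 'D' (pvLength + 1).toNat line.toList

-- ===== PRECONDITION & SPEC =====
def Spec_c_RD (line : String) (out : Bool) : Prop := out = c_RD_alt line
instance (line : String) (out : Bool) : Decidable (Spec_c_RD line out) := by unfold Spec_c_RD; infer_instance

-- ===== CLAIM (what is proved, stated in full; the proofs are below) =====
def Claim_equal_c_RD : Prop := ∀ (line : String), Dom_c_RD line → Spec_c_RD line (c_RD line)

-- ===== LEMMAS AND PROOFS =====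

-- A's loop invariant: with both counters still within the limit, the early-exit
-- loop decides exactly whether the final totals stay within the limit
theorem c_RD_go_eq (cs : List Char) : ∀ (r d : Int), r ≤ pvLength → d ≤ pvLength →
    c_RD_go cs r d =
      (decide (r + (cs.count 'R' : Int) ≤ pvLength) &&
       decide (d + (cs.count 'D' : Int) ≤ pvLength)) := by
  induction cs with
  | nil => intro r d hr hd; simp [c_RD_go, hr, hd]
  | cons x t ih =>
    intro r d hr hd
    by_cases hx : x = 'R'
    · subst hx
      rw [show c_RD_go ('R' :: t) r d
            = if pvLength < d ∨ pvLength < r + 1 then false else c_RD_go t (r + 1) d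
          from by simp [c_RD_go],
        List.count_cons_self, List.count_cons_of_ne (by decide : ('R' : Char) ≠ 'D')]
      by_cases h1 : pvLength < r + 1
      · rw [if_pos (Or.inr h1),
          decide_eq_false (by push_cast; omega : ¬ (r + ((t.count 'R' + 1 : Nat) : Int) ≤ pvLength)),
          Bool.false_and]
      · rw [if_neg (by omega : ¬ (pvLength < d ∨ pvLength < r + 1)), ih (r + 1) d (by omega) hd]
        congr 1
        rw [decide_eq_decide]
        push_cast
        omega
    · by_cases hxd : x = 'D'
      · subst hxd
        rw [show c_RD_go ('D' :: t) r d
              = if pvLength < d + 1 ∨ pvLength < r then false else c_RD_go t r (d + 1)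
            from by simp [c_RD_go],
          List.count_cons_self, List.count_cons_of_ne (by decide : ('D' : Char) ≠ 'R')]
        by_cases h1 : pvLength < d + 1
        · rw [if_pos (Or.inl h1),
            decide_eq_false (by push_cast; omega : ¬ (d + ((t.count 'D' + 1 : Nat) : Int) ≤ pvLength)),
            Bool.and_false]
        · rw [if_neg (by omega : ¬ (pvLength < d + 1 ∨ pvLength < r)), ih r (d + 1) hr (by omega)]
          congr 1
          rw [decide_eq_decide]
          push_cast
          omega
      · rw [show c_RD_go (x :: t) r d
              = if pvLength < d ∨ pvLength < r then false else c_RD_go t r d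
            from by simp [c_RD_go, hx, hxd],
          if_neg (by omega : ¬ (pvLength < d ∨ pvLength < r)), ih r d hr hd,
          List.count_cons_of_ne hx,
          List.count_cons_of_ne hxd]

-- cutting past the first occurrence of ch removes exactly one ch
theorem count_drop_succ_find (s : List Char) (ch : Char)
    (h : PySem.Chars.find s [ch] ≠ -1) :
    s.count ch = (s.drop ((PySem.Chars.find s [ch]).toNat + 1)).count ch + 1 := by
  have hnn : 0 ≤ PySem.Chars.find s [ch] := by
    have := PySem.Chars.neg_one_le_find (s := s) (sub := [ch])
    omega
  obtain ⟨hpre, hmin⟩ := PySem.Chars.find_spec (s := s) (sub := [ch]) hnn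
  set i := (PySem.Chars.find s [ch]).toNat with hi
  have hlen : i < s.length := by
    by_contra hge
    rw [List.drop_eq_nil_of_le (Nat.le_of_not_lt hge)] at hpre
    simpa using List.IsPrefix.length_le hpre
  have hget : s[i] = ch := by
    rw [List.drop_eq_getElem_cons hlen] at hpre
    exact ((List.cons_prefix_cons.mp hpre).1).symm
  have hnotin : ch ∉ s.take i := by
    intro hmem
    obtain ⟨j, hj, hjget⟩ := List.getElem_of_mem (by simpa using hmem)
    have hj' : j < i ∧ j < s.length := by simpa using hj
    apply hmin j hj'.1
    rw [List.drop_eq_getElem_cons hj'.2]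
    have hsj : s[j] = ch := by
      rw [List.getElem_take] at hjget
      exact hjget
    rw [hsj]
    exact ⟨_, rfl⟩
  calc s.count ch = (s.take i ++ s.drop i).count ch := by rw [List.take_append_drop]
    _ = (s.take i).count ch + (s.drop i).count ch := List.count_append ..
    _ = (s.drop i).count ch := by rw [List.count_eq_zero_of_not_mem hnotin, Nat.zero_add]
    _ = (s[i] :: s.drop (i + 1)).count ch := by rw [List.drop_eq_getElem_cons hlen]
    _ = (s.drop (i + 1)).count ch + 1 := by rw [hget, List.count_cons_self]

-- B's loop: the k-round find-and-cut decides exactly 'count < k'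
theorem fitsGo_eq (ch : Char) : ∀ (k : Nat) (s : List Char),
    fitsGo ch k s = decide (s.count ch < k) := by
  intro k
  induction k with
  | zero => intro s; simp [fitsGo]
  | succ n ih =>
    intro s
    rw [show fitsGo ch (n + 1) s
          = if PySem.Chars.find s [ch] = -1 then true
            else fitsGo ch n (PySem.List.slice s (some (PySem.Chars.find s [ch] + 1)) none)
        from rfl]
    by_cases h : PySem.Chars.find s [ch] = -1
    · rw [if_pos h]
      have hnot : ¬ ([ch] <:+: s) := (PySem.Chars.find_eq_neg_one_iff ..).mp h
      have hni : ch ∉ s := by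
        intro hm
        obtain ⟨u, v, rfl⟩ := List.append_of_mem hm
        exact hnot ⟨u, v, by simp⟩
      simp [List.count_eq_zero_of_not_mem hni]
    · rw [if_neg h]
      have hnn : 0 ≤ PySem.Chars.find s [ch] := by
        have := PySem.Chars.neg_one_le_find (s := s) (sub := [ch])
        omega
      rw [show PySem.List.slice s (some (PySem.Chars.find s [ch] + 1)) none
            = s.drop (PySem.Chars.find s [ch] + 1).toNat
          from PySem.List.slice_from s (by omega), ih]
      have hcount := count_drop_succ_find s ch h
      have htn : (PySem.Chars.find s [ch] + 1).toNat = (PySem.Chars.find s [ch]).toNat + 1 := by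
        omega
      rw [htn, decide_eq_decide]
      omega

-- ===== VERDICT (by name: the statement is the Claim_ definition above) =====
theorem c_RD_spec : Claim_equal_c_RD := by
  intro line _
  unfold Spec_c_RD c_RD c_RD_alt
  rw [c_RD_go_eq line.toList 0 0 (by decide) (by decide), fitsGo_eq, fitsGo_eq]
  congr 1 <;> · rw [decide_eq_decide]; simp [pvLength]; omega
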